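-- pv_equiv track=rewrite | github.com/WallerTsai/OJ-Solution | leetcode-py/贪心/No3635.py | earliestFinishTime
-- ===== SOURCE A (Python) =====
-- from math import inf
-- from typing import List
--
-- def earliestFinishTime(landStartTime: List[int], landDuration: List[int], waterStartTime: List[int], waterDuration: List[int]) -> int:
--     le = min(x + y for x, y in zip(landStartTime, landDuration))
--     we = min(x + y for x, y in zip(waterStartTime, waterDuration))
--     ans = inf
--     for ls, ld in zip(landStartTime, landDuration):
--         ans = min(ans, max(we,ls) + ld)
--     for ws, wd in zip(waterStartTime, waterDuration):
--         ans = min(ans,max(le, ws) + wd)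
--     return ans  #194ms
-- ===== SOURCE B (Python) =====
-- def earliestFinishTime(landStartTime, landDuration, waterStartTime, waterDuration):
--     # Brute force over all (land ride, water ride) pairs, trying both orders per pair.
--     return min(
--         min(max(ls + ld, ws) + wd, max(ws + wd, ls) + ld)
--         for ls, ld in zip(landStartTime, landDuration)
--         for ws, wd in zip(waterStartTime, waterDuration)
--     )
-- ===== Notes on version B (the rewrite author's own statement) =====
-- stated objective: simpler
-- what changed: B replaces A's two precomputed per-type minimum finishes plus two sweep loops by a single brute-force minimum over all (land, water) ride pairs, trying both orders per pair with min(max(ls+ld,ws)+wd, max(ws+wd,ls)+ld).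
import Mathlib
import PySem

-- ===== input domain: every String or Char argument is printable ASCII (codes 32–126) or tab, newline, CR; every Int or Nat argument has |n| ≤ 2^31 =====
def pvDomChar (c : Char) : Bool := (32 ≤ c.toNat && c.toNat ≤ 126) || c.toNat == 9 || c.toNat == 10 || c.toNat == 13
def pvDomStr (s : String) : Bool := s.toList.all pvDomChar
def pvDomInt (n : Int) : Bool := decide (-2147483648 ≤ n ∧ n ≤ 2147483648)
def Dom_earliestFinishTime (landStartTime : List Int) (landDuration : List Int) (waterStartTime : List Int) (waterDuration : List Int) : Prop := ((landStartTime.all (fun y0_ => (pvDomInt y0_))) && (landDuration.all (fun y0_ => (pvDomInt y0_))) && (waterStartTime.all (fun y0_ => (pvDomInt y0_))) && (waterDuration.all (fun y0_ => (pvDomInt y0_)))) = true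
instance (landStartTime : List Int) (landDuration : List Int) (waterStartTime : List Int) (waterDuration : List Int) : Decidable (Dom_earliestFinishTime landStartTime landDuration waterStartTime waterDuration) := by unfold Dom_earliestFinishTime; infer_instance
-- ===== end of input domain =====

-- B drops A's precomputed per-type minimum finishes and two sweeps, taking one brute-force
-- minimum over all (land, water) ride pairs, trying both orders per pair (objective: simpler).

-- ===== PORT A =====
-- Python's float('inf') accumulator is ported as Option Int (none = inf); on every input
-- admitted by Pre_ both zips are nonempty, so the result is an Int, as in Python.
def earliestFinishTime (landStartTime : List Int) (landDuration : List Int) (waterStartTime : List Int) (waterDuration : List Int) : Int :=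
  let lz := List.zip landStartTime landDuration
  let wz := List.zip waterStartTime waterDuration
  -- le = min(x + y for x, y in zip(landStartTime, landDuration))  (ValueError on empty → outside Pre_, getD 0 unreachable)
  let le := (PySem.List.min? (lz.map (fun p => p.1 + p.2)) (fun y => y)).getD 0
  let we := (PySem.List.min? (wz.map (fun p => p.1 + p.2)) (fun y => y)).getD 0
  let ans : Option Int := none
  let ans := lz.foldl (fun a p => some (match a with | none => max we p.1 + p.2 | some v => min v (max we p.1 + p.2))) ans
  let ans := wz.foldl (fun a p => some (match a with | none => max le p.1 + p.2 | some v => min v (max le p.1 + p.2))) ans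
  ans.getD 0

-- ===== PORT B =====
def earliestFinishTime_alt (landStartTime : List Int) (landDuration : List Int) (waterStartTime : List Int) (waterDuration : List Int) : Int :=
  let pairs := (List.zip landStartTime landDuration).flatMap (fun l =>
    (List.zip waterStartTime waterDuration).map (fun w =>
      min (max (l.1 + l.2) w.1 + w.2) (max (w.1 + w.2) l.1 + l.2)))
  (PySem.List.min? pairs (fun y => y)).getD 0

-- ===== PRECONDITION & SPEC =====
-- Pre_ admits exactly the inputs on which Python A returns: if any of the four lists is
-- empty, one of A's min(...) generators is empty and A raises ValueError (so does B).
def Pre_earliestFinishTime (landStartTime : List Int) (landDuration : List Int) (waterStartTime : List Int) (waterDuration : List Int) : Prop :=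
  landStartTime ≠ [] ∧ landDuration ≠ [] ∧ waterStartTime ≠ [] ∧ waterDuration ≠ []
instance (landStartTime : List Int) (landDuration : List Int) (waterStartTime : List Int) (waterDuration : List Int) : Decidable (Pre_earliestFinishTime landStartTime landDuration waterStartTime waterDuration) := by unfold Pre_earliestFinishTime; infer_instance
def pvWitness_earliestFinishTime : List Int × List Int × List Int × List Int := ([2, 8], [4, 1], [0], [3])

def Spec_earliestFinishTime (landStartTime : List Int) (landDuration : List Int) (waterStartTime : List Int) (waterDuration : List Int) (out : Int) : Prop := out = earliestFinishTime_alt landStartTime landDuration waterStartTime waterDuration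
instance (landStartTime : List Int) (landDuration : List Int) (waterStartTime : List Int) (waterDuration : List Int) (out : Int) : Decidable (Spec_earliestFinishTime landStartTime landDuration waterStartTime waterDuration out) := by unfold Spec_earliestFinishTime; infer_instance

-- ===== CLAIM (what is proved, stated in full; the proofs are below) =====
def Claim_equal_earliestFinishTime : Prop := ∀ (landStartTime : List Int) (landDuration : List Int) (waterStartTime : List Int) (waterDuration : List Int), Dom_earliestFinishTime landStartTime landDuration waterStartTime waterDuration → Pre_earliestFinishTime landStartTime landDuration waterStartTime waterDuration → Spec_earliestFinishTime landStartTime landDuration waterStartTime waterDuration (earliestFinishTime landStartTime landDuration waterStartTime waterDuration)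

-- ===== LEMMAS AND PROOFS =====

-- `Wm x0 xs q` = minimum of q over the nonempty list x0 :: xs, as the running-min fold.
def Wm {α : Type} (x0 : α) (xs : List α) (q : α → Int) : Int :=
  xs.foldl (fun a x => min a (q x)) (q x0)

-- pull a seed out of a running-min fold
theorem foldl_min_acc {α : Type} (f : α → Int) (xs : List α) :
    ∀ (a b : Int), xs.foldl (fun c q => min c (f q)) (min a b) = min a (xs.foldl (fun c q => min c (f q)) b) := by
  induction xs with
  | nil => intro a b; simp [List.foldl]
  | cons x t ih => intro a b; simp only [List.foldl, min_assoc]; exact ih a (min b (f x))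

theorem Wm_seed {α : Type} (x0 : α) (xs : List α) (q : α → Int) (a : Int) :
    xs.foldl (fun c x => min c (q x)) (min a (q x0)) = min a (Wm x0 xs q) := by
  simpa [Wm] using foldl_min_acc q xs a (q x0)

-- min of pointwise min splits
theorem Wm_min_split {α : Type} (x0 : α) (xs : List α) (q1 q2 : α → Int) :
    Wm x0 xs (fun x => min (q1 x) (q2 x)) = min (Wm x0 xs q1) (Wm x0 xs q2) := by
  suffices h : ∀ (t : List α) (a b : Int),
      t.foldl (fun c x => min c (min (q1 x) (q2 x))) (min a b)
        = min (t.foldl (fun c x => min c (q1 x)) a) (t.foldl (fun c x => min c (q2 x)) b) by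
    simpa [Wm] using h xs (q1 x0) (q2 x0)
  intro t
  induction t with
  | nil => intro a b; simp [List.foldl]
  | cons x t ih =>
    intro a b
    simp only [List.foldl]
    rw [show min (min a b) (min (q1 x) (q2 x)) = min (min a (q1 x)) (min b (q2 x)) from min_min_min_comm a b (q1 x) (q2 x)]
    exact ih (min a (q1 x)) (min b (q2 x))

-- the monotone map x ↦ max x c + d distributes over the running min
theorem Wm_max_add {α : Type} (x0 : α) (xs : List α) (s : α → Int) (c d : Int) :
    Wm x0 xs (fun x => max (s x) c + d) = max (Wm x0 xs s) c + d := by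
  suffices h : ∀ (t : List α) (a : Int),
      t.foldl (fun b x => min b (max (s x) c + d)) (max a c + d)
        = max (t.foldl (fun b x => min b (s x)) a) c + d by
    simpa [Wm] using h xs (s x0)
  intro t
  induction t with
  | nil => intro a; simp [List.foldl]
  | cons x t ih =>
    intro a
    simp only [List.foldl]
    rw [show min (max a c + d) (max (s x) c + d) = max (min a (s x)) c + d by omega]
    exact ih (min a (s x))

-- swapping the two nested running minima
theorem Wm_swap {α β : Type} (p : α → β → Int) (w0 : β) (wt : List β) :
    ∀ (lt : List α) (q : β → Int),
      lt.foldl (fun a l => min a (Wm w0 wt (p l))) (Wm w0 wt q)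
        = Wm w0 wt (fun w => lt.foldl (fun a l => min a (p l w)) (q w)) := by
  intro lt
  induction lt with
  | nil => intro q; rfl
  | cons l t ih =>
    intro q
    simp only [List.foldl]
    rw [show min (Wm w0 wt q) (Wm w0 wt (p l)) = Wm w0 wt (fun w => min (q w) (p l w)) from (Wm_min_split w0 wt q (p l)).symm]
    exact ih (fun w => min (q w) (p l w))

theorem Wm_congr {α : Type} (x0 : α) (xs : List α) (q1 q2 : α → Int) (h : ∀ x, q1 x = q2 x) :
    Wm x0 xs q1 = Wm x0 xs q2 := by
  have : q1 = q2 := funext h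
  rw [this]

-- A's Option-Int loop body computes the running min (once the accumulator is some _)
theorem foldl_optmin {α : Type} (f : α → Int) (xs : List α) :
    ∀ (v : Int), xs.foldl (fun a p => some (match a with | none => f p | some v => min v (f p))) (some v)
      = some (xs.foldl (fun c p => min c (f p)) v) := by
  induction xs with
  | nil => intro v; rfl
  | cons x t ih => intro v; simpa [List.foldl] using ih (min v (f x))

theorem foldl_optA {α : Type} (f : α → Int) (x : α) (t : List α) :
    (x :: t).foldl (fun a p => some (match a with | none => f p | some v => min v (f p))) none
      = some (Wm x t f) := by
  show t.foldl _ (some (f x)) = _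
  exact foldl_optmin f t (f x)

theorem foldl_optB {α : Type} (f : α → Int) (x : α) (t : List α) (v : Int) :
    (x :: t).foldl (fun a p => some (match a with | none => f p | some v => min v (f p))) (some v)
      = some (min v (Wm x t f)) := by
  show t.foldl _ (some (min v (f x))) = _
  rw [foldl_optmin f t (min v (f x)), Wm_seed x t f v]

-- fold of min over a flatMap
theorem foldl_min_flatMap {α : Type} (k : α → List Int) (xs : List α) :
    ∀ (a : Int), (xs.flatMap k).foldl min a = xs.foldl (fun a l => (k l).foldl min a) a := by
  induction xs with
  | nil => intro a; simp
  | cons x t ih => intro a; simp only [List.flatMap_cons, List.foldl_append, List.foldl]; exact ih _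

theorem foldl_ext' {α : Type} (f g : Int → α → Int) (h : ∀ a x, f a x = g a x) :
    ∀ (xs : List α) (a : Int), xs.foldl f a = xs.foldl g a := by
  intro xs
  induction xs with
  | nil => intro a; rfl
  | cons x t ih => intro a; rw [List.foldl_cons, List.foldl_cons, h a x]; exact ih _

-- ===== VERDICT (by name: the statement is the Claim_ definition above) =====
theorem earliestFinishTime_spec : Claim_equal_earliestFinishTime := by
  intro lsl ldl wsl wdl _ hPre
  obtain ⟨hl1, hl2, hw1, hw2⟩ := hPre
  obtain ⟨a0, at', rfl⟩ := List.exists_cons_of_ne_nil hl1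
  obtain ⟨b0, bt, rfl⟩ := List.exists_cons_of_ne_nil hl2
  obtain ⟨c0, ct, rfl⟩ := List.exists_cons_of_ne_nil hw1
  obtain ⟨d0, dt, rfl⟩ := List.exists_cons_of_ne_nil hw2
  show earliestFinishTime _ _ _ _ = earliestFinishTime_alt _ _ _ _
  set l0 : Int × Int := (a0, b0) with hl0
  set w0 : Int × Int := (c0, d0) with hw0
  set lt := List.zip at' bt with hlt
  set wt := List.zip ct dt with hwt
  have hzl : List.zip (a0 :: at') (b0 :: bt) = l0 :: lt := rfl
  have hzw : List.zip (c0 :: ct) (d0 :: dt) = w0 :: wt := rfl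
  set le := Wm l0 lt (fun p => p.1 + p.2) with hle
  set we := Wm w0 wt (fun p => p.1 + p.2) with hwe
  -- ---- A's value
  have hAle : (PySem.List.min? ((List.zip (a0 :: at') (b0 :: bt)).map (fun p => p.1 + p.2)) (fun y => y)).getD 0 = le := by
    rw [hzl, List.map_cons, PySem.List.min?_id_cons, Option.getD_some, List.foldl_map]; rfl
  have hAwe : (PySem.List.min? ((List.zip (c0 :: ct) (d0 :: dt)).map (fun p => p.1 + p.2)) (fun y => y)).getD 0 = we := by
    rw [hzw, List.map_cons, PySem.List.min?_id_cons, Option.getD_some, List.foldl_map]; rfl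
  have hA : earliestFinishTime (a0 :: at') (b0 :: bt) (c0 :: ct) (d0 :: dt)
      = min (Wm l0 lt (fun p => max we p.1 + p.2)) (Wm w0 wt (fun p => max le p.1 + p.2)) := by
    show (((List.zip (c0 :: ct) (d0 :: dt)).foldl _ ((List.zip (a0 :: at') (b0 :: bt)).foldl _ none)).getD 0) = _
    rw [hAle, hAwe, hzl, hzw,
        foldl_optA (fun p => max we p.1 + p.2) l0 lt,
        foldl_optB (fun p => max le p.1 + p.2) w0 wt (Wm l0 lt (fun p => max we p.1 + p.2)),
        Option.getD_some]
  -- ---- B's value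
  have hB : earliestFinishTime_alt (a0 :: at') (b0 :: bt) (c0 :: ct) (d0 :: dt)
      = Wm l0 lt (fun l => Wm w0 wt (fun w => min (max (l.1 + l.2) w.1 + w.2) (max (w.1 + w.2) l.1 + l.2))) := by
    show (PySem.List.min? ((List.zip (a0 :: at') (b0 :: bt)).flatMap
        (fun l => (List.zip (c0 :: ct) (d0 :: dt)).map
          (fun w => min (max (l.1 + l.2) w.1 + w.2) (max (w.1 + w.2) l.1 + l.2)))) (fun y => y)).getD 0 = _
    rw [hzl, hzw]
    rw [List.flatMap_cons, List.map_cons, List.cons_append, PySem.List.min?_id_cons, Option.getD_some]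
    rw [List.foldl_append, List.foldl_map, foldl_min_flatMap]
    have e2 : ∀ (a : Int) (l : Int × Int),
        ((w0 :: wt).map (fun w => min (max (l.1 + l.2) w.1 + w.2) (max (w.1 + w.2) l.1 + l.2))).foldl min a
          = min a (Wm w0 wt (fun w => min (max (l.1 + l.2) w.1 + w.2) (max (w.1 + w.2) l.1 + l.2))) := by
      intro a l
      rw [List.map_cons, List.foldl_cons, List.foldl_map]
      exact Wm_seed w0 wt _ a
    exact foldl_ext' _ _ e2 lt _
  -- ---- the algebra connecting them
  have hJ : ∀ l : Int × Int,
      Wm w0 wt (fun w => min (max (l.1 + l.2) w.1 + w.2) (max (w.1 + w.2) l.1 + l.2))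
        = min (Wm w0 wt (fun w => max (l.1 + l.2) w.1 + w.2)) (max we l.1 + l.2) := by
    intro l
    have h1 := Wm_min_split w0 wt (fun w => max (l.1 + l.2) w.1 + w.2) (fun w => max (w.1 + w.2) l.1 + l.2)
    have h2 : Wm w0 wt (fun w => max (w.1 + w.2) l.1 + l.2) = max we l.1 + l.2 :=
      Wm_max_add w0 wt (fun p => p.1 + p.2) l.1 l.2
    rw [h1, h2]
  have hswap : Wm l0 lt (fun l => Wm w0 wt (fun w => max (l.1 + l.2) w.1 + w.2))
      = Wm w0 wt (fun w => max le w.1 + w.2) := by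
    have h4 := Wm_swap (fun (l w : Int × Int) => max (l.1 + l.2) w.1 + w.2) w0 wt lt
      (fun w => max (l0.1 + l0.2) w.1 + w.2)
    have h5 : ∀ w : Int × Int,
        lt.foldl (fun a l => min a (max (l.1 + l.2) w.1 + w.2)) (max (l0.1 + l0.2) w.1 + w.2)
          = max le w.1 + w.2 :=
      fun w => Wm_max_add l0 lt (fun p => p.1 + p.2) w.1 w.2
    exact h4.trans (Wm_congr _ _ _ _ h5)
  calc earliestFinishTime (a0 :: at') (b0 :: bt) (c0 :: ct) (d0 :: dt)
      = min (Wm l0 lt (fun p => max we p.1 + p.2)) (Wm w0 wt (fun p => max le p.1 + p.2)) := hA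
    _ = min (Wm l0 lt (fun l => Wm w0 wt (fun w => max (l.1 + l.2) w.1 + w.2))) (Wm l0 lt (fun p => max we p.1 + p.2)) := by
        rw [hswap, min_comm]
    _ = Wm l0 lt (fun l => min (Wm w0 wt (fun w => max (l.1 + l.2) w.1 + w.2)) (max we l.1 + l.2)) :=
        (Wm_min_split l0 lt _ _).symm
    _ = Wm l0 lt (fun l => Wm w0 wt (fun w => min (max (l.1 + l.2) w.1 + w.2) (max (w.1 + w.2) l.1 + l.2))) :=
        (Wm_congr _ _ _ _ hJ).symm
    _ = earliestFinishTime_alt (a0 :: at') (b0 :: bt) (c0 :: ct) (d0 :: dt) := hB.symm
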